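-- pv_equiv track=rewrite | github.com/INSAlgo/trainings-2018 | W9_dec10_dec16/4_chief_hopper.py | chiefHopper
-- ===== SOURCE A (Python) =====
-- def chiefHopper(arr):
--     sumh = 0
--     minE = 0
--     p2 = 1
--     for val in arr:
--         sumh = 2 * sumh + val
--         p2 *= 2
--
--         # this is ugly but ceil() has numerical instability
--         neededE = sumh // p2
--         if sumh % p2:
--             neededE += 1
--
--         if neededE > minE:
--             minE = neededE
--     return minE
-- ===== SOURCE B (Python) =====
-- def chiefHopper(arr):
--     # Backward recurrence: minimum energy needed before each jump,
--     # e = max(0, ceil((e + val) / 2)), keeps intermediate integers small.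
--     e = 0
--     for val in reversed(arr):
--         e = max(0, -(-(e + val) // 2))
--     return e
-- ===== Notes on version B (the rewrite author's own statement) =====
-- stated objective: faster
-- what changed: Replaces A's forward scan that maintains the ever-growing big integers sumh and p2=2^k (n-bit arithmetic per step) by a backward fold e = max(0, ceil((e+val)/2)) over the reversed list, which keeps every intermediate integer small.
import Mathlib
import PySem

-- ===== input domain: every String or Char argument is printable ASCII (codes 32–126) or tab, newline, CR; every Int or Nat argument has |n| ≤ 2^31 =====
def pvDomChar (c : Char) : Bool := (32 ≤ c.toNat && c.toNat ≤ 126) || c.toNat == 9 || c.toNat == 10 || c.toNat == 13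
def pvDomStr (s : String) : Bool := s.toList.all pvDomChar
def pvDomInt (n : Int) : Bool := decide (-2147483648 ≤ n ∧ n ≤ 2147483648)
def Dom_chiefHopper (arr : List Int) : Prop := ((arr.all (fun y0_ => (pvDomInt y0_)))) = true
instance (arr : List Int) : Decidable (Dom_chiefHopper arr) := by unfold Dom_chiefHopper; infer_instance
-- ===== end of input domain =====

-- B replaces A's forward scan over ever-growing big integers (sumh, p2 = 2^k) by the
-- backward recurrence e = max(0, ceil((e+val)/2)), which keeps integers small (faster per the hint's mechanism).

-- ===== PORT A =====
def chiefHopperStep (st : Int × Int × Int) (val : Int) : Int × Int × Int :=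
  let sumh := 2 * st.1 + val
  let p2 := st.2.2 * 2
  let neededE := PySem.Int.floordiv sumh p2
  let neededE := if PySem.Int.mod sumh p2 ≠ 0 then neededE + 1 else neededE
  let minE := if neededE > st.2.1 then neededE else st.2.1
  (sumh, minE, p2)

def chiefHopper (arr : List Int) : Int :=
  (arr.foldl chiefHopperStep ((0 : Int), (0 : Int), (1 : Int))).2.1

-- ===== PORT B =====
def chiefHopperAltStep (val e : Int) : Int :=
  max 0 (-(PySem.Int.floordiv (-(e + val)) 2))

def chiefHopper_alt (arr : List Int) : Int :=
  arr.foldr chiefHopperAltStep 0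

-- ===== PRECONDITION & SPEC =====
def Spec_chiefHopper (arr : List Int) (out : Int) : Prop := out = chiefHopper_alt arr
instance (arr : List Int) (out : Int) : Decidable (Spec_chiefHopper arr out) := by unfold Spec_chiefHopper; infer_instance

-- ===== CLAIM (what is proved, stated in full; the proofs are below) =====
def Claim_equal_chiefHopper : Prop := ∀ (arr : List Int), Dom_chiefHopper arr → Spec_chiefHopper arr (chiefHopper arr)

-- ===== LEMMAS AND PROOFS =====

-- ceiling division a/b (b > 0), exactly B's expression -(-(e+val)//2)
def cdivP (a b : Int) : Int := -(PySem.Int.floordiv (-a) b)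

theorem cdivP_bounds (a b : Int) (hb : 0 < b) :
    (cdivP a b - 1) * b < a ∧ a ≤ cdivP a b * b := by
  have h := (PySem.Int.neg_floordiv_neg_eq_iff_of_pos (a := a) (b := b) (q := cdivP a b) hb).mp rfl
  exact h

theorem cdivP_eq (a b q : Int) (hb : 0 < b) (h1 : (q - 1) * b < a) (h2 : a ≤ q * b) :
    cdivP a b = q := by
  exact (PySem.Int.neg_floordiv_neg_eq_iff_of_pos (a := a) (b := b) (q := q) hb).mpr ⟨h1, h2⟩

theorem cdivP_one (a : Int) : cdivP a 1 = a := by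
  apply cdivP_eq a 1 a (by omega) <;> omega

-- A's floor-divide-then-round-up equals ceiling division
theorem needed_eq (s p : Int) (hp : 0 < p) :
    (if PySem.Int.mod s p ≠ 0 then PySem.Int.floordiv s p + 1 else PySem.Int.floordiv s p)
      = cdivP s p := by
  have hs := PySem.Int.floordiv_mul_add_mod s p
  have h0 := PySem.Int.mod_nonneg s hp
  have h1 := PySem.Int.mod_lt s hp
  set q := PySem.Int.floordiv s p with hq
  set m := PySem.Int.mod s p with hm
  by_cases h : m = 0
  · simp only [h, ne_eq, not_true_eq_false, if_false]
    refine (cdivP_eq s p q hp ?_ ?_).symm <;> nlinarith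
  · have hm' : 0 < m := lt_of_le_of_ne h0 (Ne.symm h)
    simp only [ne_eq, h, not_false_eq_true, if_true]
    refine (cdivP_eq s p (q + 1) hp ?_ ?_).symm <;> nlinarith

-- nested-ceiling identity: ceil((2s+x)/(2p)) = ceil((s + ceil(x/2))/p)
theorem cdivP_nest (s x p : Int) (hp : 0 < p) :
    cdivP (2 * s + x) (2 * p) = cdivP (s + cdivP x 2) p := by
  obtain ⟨hq1, hq2⟩ := cdivP_bounds x 2 (by omega)
  obtain ⟨hr1, hr2⟩ := cdivP_bounds (s + cdivP x 2) p hp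
  set q := cdivP x 2
  set r := cdivP (s + q) p
  apply cdivP_eq _ _ r (by omega) <;> nlinarith

theorem cdivP_mono (a b p : Int) (hp : 0 < p) (hab : a ≤ b) : cdivP a p ≤ cdivP b p := by
  by_contra hc
  rw [not_le] at hc
  obtain ⟨ha1, ha2⟩ := cdivP_bounds a p hp
  obtain ⟨hb1, hb2⟩ := cdivP_bounds b p hp
  nlinarith

theorem cdivP_max (a b p : Int) (hp : 0 < p) :
    cdivP (max a b) p = max (cdivP a p) (cdivP b p) := by
  rcases le_total a b with h | h
  · rw [max_eq_right h, max_eq_right (cdivP_mono a b p hp h)]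
  · rw [max_eq_left h, max_eq_left (cdivP_mono b a p hp h)]

theorem if_gt_eq_max (a b : Int) : (if b > a then b else a) = max a b := by
  rcases le_total b a with h | h <;> simp [max_def] <;> omega

-- main invariant: A's loop from state (s, m, 2^k·…) computes max m ⌈(s + ⌈(B(t)+h)/2⌉)/p⌉
theorem loop_eq (t : List Int) : ∀ (h s m p : Int), 0 < p →
    (List.foldl chiefHopperStep (s, m, p) (h :: t)).2.1
      = max m (cdivP (s + cdivP (chiefHopper_alt t + h) 2) p) := by
  induction t with
  | nil =>
    intro h s m p hp
    simp only [List.foldl_cons, List.foldl_nil, chiefHopperStep, if_gt_eq_max, needed_eq _ _ (by omega : (0:Int) < p * 2)]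
    have : p * 2 = 2 * p := by ring
    rw [this, cdivP_nest s h p hp]
    simp [chiefHopper_alt]
  | cons h' t' ih =>
    intro h s m p hp
    have h2p : (0 : Int) < p * 2 := by omega
    rw [List.foldl_cons]
    simp only [chiefHopperStep, if_gt_eq_max, needed_eq _ _ h2p]
    rw [ih h' (2 * s + h) _ (p * 2) h2p, max_assoc]
    congr 1
    have e1 : cdivP (2 * s + h) (p * 2) = cdivP ((2 * s + h) + 0) (p * 2) := by rw [add_zero]
    rw [e1, ← cdivP_max _ _ _ h2p, max_add_add_left]
    have e2 : (2 * s + h) + max 0 (cdivP (chiefHopper_alt t' + h') 2)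
        = 2 * s + (h + max 0 (cdivP (chiefHopper_alt t' + h') 2)) := by ring
    have e3 : p * 2 = 2 * p := by ring
    rw [e2, e3, cdivP_nest _ _ _ hp]
    have e4 : chiefHopper_alt (h' :: t')
        = max 0 (cdivP (chiefHopper_alt t' + h') 2) := by
      simp [chiefHopper_alt, chiefHopperAltStep, cdivP]
    rw [e4, add_comm h]

-- ===== VERDICT (by name: the statement is the Claim_ definition above) =====
theorem chiefHopper_spec : Claim_equal_chiefHopper := by
  intro arr _
  unfold Spec_chiefHopper
  cases arr with
  | nil => simp [chiefHopper, chiefHopper_alt]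
  | cons h t =>
    show chiefHopper (h :: t) = chiefHopper_alt (h :: t)
    rw [chiefHopper, loop_eq t h 0 0 1 (by omega), zero_add, cdivP_one]
    simp [chiefHopper_alt, chiefHopperAltStep, cdivP, add_comm]
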